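-- pv_equiv track=rewrite | github.com/mccoyst/build.py | tests.py | is_legit
-- ===== SOURCE A (Python) =====
-- def is_legit(recipe, graph):
-- 	if recipe is None:
-- 		return False
--
-- 	seen = set()
-- 	for x in recipe:
-- 		if x not in graph:
-- 			return False
-- 		for d in graph[x]:
-- 			if d not in seen:
-- 				return False
-- 		seen.add(x)
-- 	return True
-- ===== SOURCE B (Python) =====
-- def is_legit(recipe, graph):
--     if recipe is None:
--         return False
--     n = len(recipe)
--     pos = {}
--     for i, x in enumerate(recipe):
--         if x not in pos:
--             pos[x] = i
--     for i, x in enumerate(recipe):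
--         if x not in graph:
--             return False
--         if any(pos.get(d, n) >= i for d in graph[x]):
--             return False
--     return True
-- ===== Notes on version B (the rewrite author's own statement) =====
-- stated objective: alternative
-- what changed: B replaces A's growing 'seen' set with a first-occurrence position table built once, then validates each item by comparing dependency indices against the current index.
import Mathlib
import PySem

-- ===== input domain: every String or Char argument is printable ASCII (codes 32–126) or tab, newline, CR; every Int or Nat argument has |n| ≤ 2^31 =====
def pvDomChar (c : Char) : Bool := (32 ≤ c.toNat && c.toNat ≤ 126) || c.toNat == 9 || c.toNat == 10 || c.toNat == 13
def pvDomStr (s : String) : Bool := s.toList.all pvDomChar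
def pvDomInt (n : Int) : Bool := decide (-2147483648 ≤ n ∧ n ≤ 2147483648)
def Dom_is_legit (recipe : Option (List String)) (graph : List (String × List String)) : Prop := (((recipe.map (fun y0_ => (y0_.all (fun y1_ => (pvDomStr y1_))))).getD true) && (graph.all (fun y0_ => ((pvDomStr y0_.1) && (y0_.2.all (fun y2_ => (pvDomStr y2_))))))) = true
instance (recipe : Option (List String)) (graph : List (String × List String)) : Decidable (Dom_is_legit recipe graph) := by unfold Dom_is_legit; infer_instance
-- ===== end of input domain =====

-- B validates the recipe against a first-occurrence position table (index comparisons)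
-- instead of A's growing 'seen' set: an alternative decomposition, same return value.

-- ===== PORT A =====
-- A: one pass over the recipe, growing a 'seen' set; each item must be a graph key
-- and each of its dependencies must already be in 'seen'.
def isLegitA_loop (graph : List (String × List String)) : List String → PySem.Set String → Bool
  | [], _ => true
  | x :: rest, seen =>
    if (PySem.Dict.mk graph).contains x = false then false
    else if ((PySem.Dict.mk graph).getD x []).all (fun d => PySem.Set.contains seen d) then
      isLegitA_loop graph rest (PySem.Set.add seen x)
    else false

def is_legit (recipe : Option (List String)) (graph : List (String × List String)) : Bool :=
  match recipe with
  | none => false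
  | some xs => isLegitA_loop graph xs PySem.Set.empty

-- ===== PORT B =====
-- B: build pos = first-occurrence index of each item, then check every dependency's
-- position is strictly before the current index (missing deps default to n).
def isLegitB_loop (graph : List (String × List String)) (pos : PySem.Dict String Int) (n : Int) :
    List (Int × String) → Bool
  | [] => true
  | (i, x) :: rest =>
    if (PySem.Dict.mk graph).contains x = false then false
    else if ((PySem.Dict.mk graph).getD x []).any (fun d => decide (i ≤ pos.getD d n)) then false
    else isLegitB_loop graph pos n rest

def is_legit_alt (recipe : Option (List String)) (graph : List (String × List String)) : Bool :=
  match recipe with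
  | none => false
  | some xs =>
    let n : Int := xs.length
    let pos := (PySem.List.enumerate xs 0).foldl
      (fun p ix => if p.contains ix.2 then p else p.insert ix.2 ix.1) PySem.Dict.empty
    isLegitB_loop graph pos n (PySem.List.enumerate xs 0)

-- ===== PRECONDITION & SPEC =====
def Spec_is_legit (recipe : Option (List String)) (graph : List (String × List String)) (out : Bool) : Prop := out = is_legit_alt recipe graph
instance (recipe : Option (List String)) (graph : List (String × List String)) (out : Bool) : Decidable (Spec_is_legit recipe graph out) := by unfold Spec_is_legit; infer_instance

-- ===== CLAIM (what is proved, stated in full; the proofs are below) =====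
def Claim_equal_is_legit : Prop := ∀ (recipe : Option (List String)) (graph : List (String × List String)), Dom_is_legit recipe graph → Spec_is_legit recipe graph (is_legit recipe graph)

-- ===== LEMMAS AND PROOFS =====

-- the position table B builds, named for the proofs (definitionally the foldl in is_legit_alt)
def posOf (xs : List String) : PySem.Dict String Int :=
  (PySem.List.enumerate xs 0).foldl
    (fun p ix => if p.contains ix.2 then p else p.insert ix.2 ix.1) PySem.Dict.empty

-- characterisation of B's fold: first-occurrence index, offset by the start s
lemma posFold_get? (xs : List String) (s : Int) (p : PySem.Dict String Int) (d : String) :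
    ((PySem.List.enumerate xs s).foldl
      (fun p ix => if p.contains ix.2 then p else p.insert ix.2 ix.1) p).get? d
    = if p.contains d then p.get? d
      else (List.idxOf? d xs).map (fun j => s + (j : Int)) := by
  induction xs generalizing s p with
  | nil =>
    cases hd : p.contains d with
    | false =>
      simp [PySem.List.enumerate, (PySem.Dict.get?_eq_none_iff_contains p d).mpr hd]
    | true => simp [PySem.List.enumerate]
  | cons x xs ih =>
    rw [PySem.List.enumerate_cons, List.foldl_cons]
    simp only []
    by_cases hx : p.contains x = true
    · rw [if_pos hx, ih]
      by_cases hd : p.contains d = true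
      · rw [if_pos hd, if_pos hd]
      · have hdx : ¬ x = d := fun h => hd (h ▸ hx)
        rw [if_neg hd, if_neg hd, List.idxOf?_cons, if_neg (by simpa using hdx)]
        cases List.idxOf? d xs with
        | none => rfl
        | some j => simp; ring
    · rw [if_neg hx, ih]
      by_cases hdx : d = x
      · subst hdx
        rw [if_pos (PySem.Dict.contains_insert_self p d s),
          PySem.Dict.get?_insert_self p d s,
          if_neg hx, List.idxOf?_cons, if_pos (by simp)]
        simp
      · have hins_c : (p.insert x s).contains d = p.contains d := by
          rw [PySem.Dict.contains_insert]
          simp [hdx]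
        have hidx : List.idxOf? d (x :: xs) = (List.idxOf? d xs).map (· + 1) := by
          rw [List.idxOf?_cons, if_neg (by simpa using fun h : x = d => hdx h.symm)]
        rw [hins_c, PySem.Dict.get?_insert_of_ne p s hdx, hidx]
        by_cases hd : p.contains d = true
        · rw [if_pos hd, if_pos hd]
        · rw [if_neg hd, if_neg hd]
          cases List.idxOf? d xs with
          | none => rfl
          | some j => simp; ring

-- membership in a prefix ↔ first occurrence before the cut
lemma mem_take_iff_idxOf? (xs : List String) (d : String) (k : Nat) :
    d ∈ xs.take k ↔ ∃ j, List.idxOf? d xs = some j ∧ j < k := by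
  induction xs generalizing k with
  | nil => simp
  | cons x xs ih =>
    cases k with
    | zero => simp
    | succ k =>
      rw [List.take_succ_cons, List.idxOf?_cons]
      by_cases hdx : x = d
      · subst hdx
        rw [if_pos (by simp)]
        exact iff_of_true (List.mem_cons_self) ⟨0, rfl, Nat.succ_pos k⟩
      · rw [if_neg (by simpa using hdx)]
        simp only [List.mem_cons, ih]
        constructor
        · rintro (h | ⟨j, hj, hjk⟩)
          · exact absurd h.symm hdx
          · exact ⟨j + 1, by rw [hj]; rfl, by omega⟩
        · rintro ⟨j, hj, hjk⟩
          cases hcase : List.idxOf? d xs with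
          | none => rw [hcase] at hj; simp at hj
          | some j' =>
            rw [hcase] at hj
            obtain rfl : j = j' + 1 := by simpa using hj.symm
            exact Or.inr ⟨j', rfl, by omega⟩

-- the key bridge: pos.get(d, n) < k ⟺ d occurs among the first k items
lemma posOf_lt_iff (xs : List String) (d : String) (k : Nat) (hk : k ≤ xs.length) :
    ((posOf xs).getD d (xs.length : Int) < (k : Int)) ↔ d ∈ xs.take k := by
  rw [PySem.Dict.getD_eq_get?_getD, posOf, posFold_get?, mem_take_iff_idxOf?]
  cases List.idxOf? d xs with
  | none =>
    simp [PySem.Dict.contains_empty]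
    exact hk
  | some j =>
    simp [PySem.Dict.contains_empty]

-- main loop correspondence: A's 'seen' set vs B's index comparison on the same suffix
lemma loops_eq (graph : List (String × List String)) (xs : List String) :
    ∀ (suf pre : List String) (seen : PySem.Set String),
      xs = pre ++ suf → (∀ d, d ∈ seen ↔ d ∈ pre) →
      isLegitA_loop graph suf seen
        = isLegitB_loop graph (posOf xs) (xs.length : Int)
            (PySem.List.enumerate suf (pre.length : Int)) := by
  intro suf
  induction suf with
  | nil => intro pre seen _ _; simp [isLegitA_loop, isLegitB_loop, PySem.List.enumerate]
  | cons x suf ih =>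
    intro pre seen hsplit hseen
    rw [PySem.List.enumerate_cons]
    simp only [isLegitA_loop, isLegitB_loop]
    cases hg : (PySem.Dict.mk graph).contains x with
    | false => simp
    | true =>
      simp only [Bool.true_eq_false, if_false]
      have hpre_le : pre.length ≤ xs.length := by subst hsplit; simp
      have hdep : ∀ d : String,
          PySem.Set.contains seen d
            = !decide ((pre.length : Int) ≤ (posOf xs).getD d (xs.length : Int)) := by
        intro d
        have h1 : (PySem.Set.contains seen d = true) ↔ d ∈ pre := by
          rw [PySem.Set.contains_iff]; exact hseen d
        have h2 : ((posOf xs).getD d (xs.length : Int) < (pre.length : Int)) ↔ d ∈ pre := by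
          rw [posOf_lt_iff xs d pre.length hpre_le]
          subst hsplit; rw [List.take_left]
        cases hc : PySem.Set.contains seen d with
        | false =>
          have hns : ¬ d ∈ seen := by
            intro hm
            rw [(PySem.Set.contains_iff seen d).mpr hm] at hc
            simp at hc
          have hnp : ¬ d ∈ pre := fun h => hns ((hseen d).mpr h)
          have hle : (pre.length : Int) ≤ (posOf xs).getD d (xs.length : Int) :=
            not_lt.mp (fun hlt => hnp (h2.mp hlt))
          simp [hle]
        | true =>
          have hd := h2.mpr (h1.mp hc)
          have hnle : ¬ ((pre.length : Int) ≤ (posOf xs).getD d (xs.length : Int)) := by omega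
          simp [hnle]
      have hall : ∀ l : List String,
          l.all (fun d => PySem.Set.contains seen d)
            = !(l.any (fun d => decide ((pre.length : Int) ≤ (posOf xs).getD d (xs.length : Int)))) := by
        intro l
        induction l with
        | nil => rfl
        | cons a l ihl =>
          simp only [List.all_cons, List.any_cons, ihl, hdep a, Bool.not_or]
      rw [hall]
      cases ha : ((PySem.Dict.mk graph).getD x []).any
          (fun d => decide ((pre.length : Int) ≤ (posOf xs).getD d (xs.length : Int))) with
      | true => simp
      | false =>
        have ihx := ih (pre ++ [x]) (PySem.Set.add seen x)
          (by rw [hsplit, List.append_assoc]; rfl)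
          (by intro d; rw [PySem.Set.mem_add]; simp [hseen d])
        rw [show (((pre ++ [x]).length : Int)) = (pre.length : Int) + 1 by simp] at ihx
        simpa using ihx

-- ===== VERDICT (by name: the statement is the Claim_ definition above) =====
theorem is_legit_spec : Claim_equal_is_legit := by
  intro recipe graph _
  unfold Spec_is_legit
  cases recipe with
  | none => rfl
  | some xs =>
    show isLegitA_loop graph xs PySem.Set.empty = _
    have h := loops_eq graph xs xs [] PySem.Set.empty rfl (by intro d; simp [PySem.Set.empty])
    simpa [is_legit_alt, posOf] using h
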